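-- pv_equiv track=rewrite | github.com/emanuelemuzio/information-theory | universal_codes.py | fibonacci_decoding
-- ===== SOURCE A (Python) =====
-- def get_fib_number(i):
--     a, b = 0, 1
--     for x in range(i):
--         a, b = b, a + b
--     return a
--
-- def fibonacci_decoding(fib_enc):
--     fib_enc = list(fib_enc)[:-1]
--     decoding = []
--     pos = 2
--
--     for bit in fib_enc:
--         if bit == '1':
--             decoding.append(get_fib_number(pos))
--         pos = pos + 1
--
--     return decoding
-- ===== SOURCE B (Python) =====
-- def fibonacci_decoding(fib_enc):
--     decoding = []
--     a, b = 1, 2  # fib(pos), fib(pos+1) for pos starting at 2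
--     for bit in fib_enc[:-1]:
--         if bit == '1':
--             decoding.append(a)
--         a, b = b, a + b
--     return decoding
-- ===== Notes on version B (the rewrite author's own statement) =====
-- stated objective: alternative
-- what changed: Instead of recomputing fib(pos) from scratch with an inner loop at every '1' bit, B maintains the running Fibonacci pair (fib(pos), fib(pos+1)) incrementally in a single pass; it trades A's per-'1'-bit inner loop for pair updates at every position, which is not faster on inputs with few '1' bits.
import Mathlib
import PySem

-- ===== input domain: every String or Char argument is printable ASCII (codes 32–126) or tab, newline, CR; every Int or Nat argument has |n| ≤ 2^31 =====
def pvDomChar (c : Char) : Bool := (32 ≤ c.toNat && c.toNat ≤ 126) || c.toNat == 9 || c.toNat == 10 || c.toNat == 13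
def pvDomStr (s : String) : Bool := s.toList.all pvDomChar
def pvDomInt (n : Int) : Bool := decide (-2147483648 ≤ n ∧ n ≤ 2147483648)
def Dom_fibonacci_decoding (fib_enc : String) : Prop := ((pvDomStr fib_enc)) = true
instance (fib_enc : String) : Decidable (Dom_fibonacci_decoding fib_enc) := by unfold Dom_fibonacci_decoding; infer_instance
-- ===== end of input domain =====

-- B replaces A's per-'1'-bit inner loop recomputing fib(pos) by a running Fibonacci pair
-- maintained incrementally in one pass (objective: alternative single-pass structure).

-- ===== PORT A =====
def get_fib_number (i : Int) : Int :=
  ((PySem.List.pyRange 0 i 1).foldl (fun (ab : Int × Int) _ => (ab.2, ab.1 + ab.2)) (0, 1)).1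

def fibonacci_decoding (fib_enc : String) : List Int :=
  let chars := PySem.List.slice fib_enc.toList none (some (-1))   -- list(fib_enc)[:-1]
  (chars.foldl
     (fun (st : List Int × Int) bit =>
       (if bit = '1' then st.1 ++ [get_fib_number st.2] else st.1, st.2 + 1))
     ([], 2)).1

-- ===== PORT B =====
def fibonacci_decoding_alt (fib_enc : String) : List Int :=
  let chars := PySem.List.slice fib_enc.toList none (some (-1))   -- fib_enc[:-1]
  (chars.foldl
     (fun (st : List Int × Int × Int) bit =>
       (if bit = '1' then st.1 ++ [st.2.1] else st.1, st.2.2, st.2.1 + st.2.2))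
     ([], 1, 2)).1

-- ===== PRECONDITION & SPEC =====
def Spec_fibonacci_decoding (fib_enc : String) (out : List Int) : Prop := out = fibonacci_decoding_alt fib_enc
instance (fib_enc : String) (out : List Int) : Decidable (Spec_fibonacci_decoding fib_enc out) := by unfold Spec_fibonacci_decoding; infer_instance

-- ===== CLAIM (what is proved, stated in full; the proofs are below) =====
def Claim_equal_fibonacci_decoding : Prop := ∀ (fib_enc : String), Dom_fibonacci_decoding fib_enc → Spec_fibonacci_decoding fib_enc (fibonacci_decoding fib_enc)

-- ===== LEMMAS AND PROOFS =====

def fibStep (ab : Int × Int) : Int × Int := (ab.2, ab.1 + ab.2)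

def pfib (n : Nat) : Int × Int := fibStep^[n] (0, 1)

theorem pfib_succ (n : Nat) : pfib (n + 1) = ((pfib n).2, (pfib n).1 + (pfib n).2) := by
  unfold pfib
  rw [Function.iterate_succ_apply']
  rfl

theorem foldl_const_step {α β : Type} (f : α → α) (l : List β) :
    ∀ init : α, l.foldl (fun a _ => f a) init = f^[l.length] init := by
  induction l with
  | nil => intro init; rfl
  | cons x xs ih =>
      intro init
      simp [List.foldl, ih, Function.iterate_succ_apply]

theorem gf_eq (n : Nat) : get_fib_number (n : Int) = (pfib n).1 := by
  unfold get_fib_number pfib fibStep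
  rw [foldl_const_step]
  simp [PySem.List.length_pyRange_one]

theorem loop_eq (cs : List Char) :
    ∀ (acc : List Int) (p : Nat),
      (cs.foldl
        (fun (st : List Int × Int) bit =>
          (if bit = '1' then st.1 ++ [get_fib_number st.2] else st.1, st.2 + 1))
        (acc, (p : Int))).1
      = (cs.foldl
          (fun (st : List Int × Int × Int) bit =>
            (if bit = '1' then st.1 ++ [st.2.1] else st.1, st.2.2, st.2.1 + st.2.2))
          (acc, (pfib p).1, (pfib p).2)).1 := by
  induction cs with
  | nil => intro acc p; rfl
  | cons c cs ih =>
      intro acc p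
      have hcast : (p : Int) + 1 = ((p + 1 : Nat) : Int) := by push_cast; ring
      have hs := pfib_succ p
      simp only [List.foldl]
      rw [hcast, ih (if c = '1' then acc ++ [get_fib_number (p : Int)] else acc) (p + 1),
          gf_eq, hs]

theorem fibonacci_decoding_eq (fib_enc : String) :
    fibonacci_decoding fib_enc = fibonacci_decoding_alt fib_enc := by
  unfold fibonacci_decoding fibonacci_decoding_alt
  have h := loop_eq (PySem.List.slice fib_enc.toList none (some (-1))) [] 2
  simpa [pfib, fibStep] using h

-- ===== VERDICT (by name: the statement is the Claim_ definition above) =====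
theorem fibonacci_decoding_spec : Claim_equal_fibonacci_decoding := by
  intro fib_enc _
  unfold Spec_fibonacci_decoding
  exact fibonacci_decoding_eq fib_enc
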